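-- pv_equiv track=rewrite | github.com/shanesatterfield/hacker-rank | Python/Python/Collections/Piling_Up/__main__.py | piling_up
-- ===== SOURCE A (Python) =====
-- import sys, collections
--
-- def piling_up(arr):
--     """Checks to make sure that a pile can be created from the list of numbers."""
--     # Initialize the deque and start off the pile starting at infinity.
--     mydq     = collections.deque(arr)
--     top_pile = float('inf')
--
--     # Iterate over the deque and check to make sure that there is always something
--     # that can be added to the pile.
--     while len(mydq) > 0:
--         next_top = max(mydq[0], mydq[-1])
--         if next_top > top_pile:
--             return False
--
--         if mydq[0] == next_top:
--             top_pile = mydq.popleft()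
--
--         elif mydq[-1] == next_top:
--             top_pile = mydq.pop()
--
--     # The list of numbers was able to make a pile.
--     return True
-- ===== SOURCE B (Python) =====
-- def piling_up(arr):
--     """Checks to make sure that a pile can be created from the list of numbers."""
--     arr = list(arr)
--     n = len(arr)
--     i = 0
--     # walk down the non-increasing descent
--     while i + 1 < n and arr[i] >= arr[i + 1]:
--         i += 1
--     # then up the non-decreasing ascent
--     while i + 1 < n and arr[i] <= arr[i + 1]:
--         i += 1
--     # pile is possible iff the whole list is valley-shaped
--     return n == 0 or i == n - 1
-- ===== Notes on version B (the rewrite author's own statement) =====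
-- stated objective: simpler
-- what changed: Replaces the deque end-popping greedy (tracking the current pile top) with a single forward scan that checks the list is valley-shaped: a non-increasing run followed by a non-decreasing run.
import Mathlib
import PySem

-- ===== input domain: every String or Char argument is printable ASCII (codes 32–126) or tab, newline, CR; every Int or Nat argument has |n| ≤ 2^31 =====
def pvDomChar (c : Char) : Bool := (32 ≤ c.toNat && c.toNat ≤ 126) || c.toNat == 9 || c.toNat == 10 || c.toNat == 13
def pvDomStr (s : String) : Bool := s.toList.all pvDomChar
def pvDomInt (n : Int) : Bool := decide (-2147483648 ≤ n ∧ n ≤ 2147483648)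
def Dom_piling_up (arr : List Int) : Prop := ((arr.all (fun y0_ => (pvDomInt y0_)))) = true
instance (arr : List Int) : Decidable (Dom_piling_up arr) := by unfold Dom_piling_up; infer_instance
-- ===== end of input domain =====

-- B replaces A's deque end-popping greedy with a single forward valley-shape scan (objective: simpler).

-- ===== PORT A =====
-- A's while loop over the deque; `top` is the current pile top, with `none` modelling the
-- initial float('inf') (exact on ints: `next_top > inf` is always False).
-- Python's `elif mydq[-1] == next_top` is always true when the first branch fails
-- (next_top is the max of the two ends), so it is ported as the else branch.
def piling_up_loop (dq : List Int) (top : Option Int) : Bool :=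
  match dq with
  | [] => true
  | x :: xs =>
    let b := (x :: xs).getLast (by simp)
    let next := max x b
    if (match top with | none => false | some t => decide (t < next)) then false
    else if x = next then piling_up_loop xs (some x)
    else piling_up_loop (x :: xs).dropLast (some b)
termination_by dq.length
decreasing_by
  · simp
  · simp

def piling_up (arr : List Int) : Bool := piling_up_loop arr none

-- ===== PORT B =====
-- first while loop of B: advance past the non-increasing descent (returns the remaining suffix)
def downRun : List Int → List Int
  | x :: y :: t => if y ≤ x then downRun (y :: t) else x :: y :: t
  | l => l

-- second while loop of B: advance past the non-decreasing ascent
def upRun : List Int → List Int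
  | x :: y :: t => if x ≤ y then upRun (y :: t) else x :: y :: t
  | l => l

-- `n == 0 or i == n - 1`: the scan stopped with at most one element left
def short (l : List Int) : Bool :=
  match l with
  | [] => true
  | [_] => true
  | _ => false

def piling_up_alt (arr : List Int) : Bool := short (upRun (downRun arr))

-- ===== PRECONDITION & SPEC =====
def Spec_piling_up (arr : List Int) (out : Bool) : Prop := out = piling_up_alt arr
instance (arr : List Int) (out : Bool) : Decidable (Spec_piling_up arr out) := by unfold Spec_piling_up; infer_instance

-- ===== CLAIM (what is proved, stated in full; the proofs are below) =====
def Claim_equal_piling_up : Prop := ∀ (arr : List Int), Dom_piling_up arr → Spec_piling_up arr (piling_up arr)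

-- ===== LEMMAS AND PROOFS =====

-- the "pile top is at least both ends" side condition carried by A's loop
def topOk (l : List Int) (t : Option Int) : Bool :=
  match t with
  | none => true
  | some t0 =>
    match l with
    | [] => true
    | x :: xs => decide (max x ((x :: xs).getLast (by simp)) ≤ t0)

lemma upRun_cons2 (x y : Int) (t : List Int) :
    upRun (x :: y :: t) = if x ≤ y then upRun (y :: t) else x :: y :: t := rfl

lemma downRun_cons2 (x y : Int) (t : List Int) :
    downRun (x :: y :: t) = if y ≤ x then downRun (y :: t) else x :: y :: t := rfl

lemma nondec_head_last : ∀ (l : List Int) (h : l ≠ []),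
    short (upRun l) = true → l.head h ≤ l.getLast h := by
  intro l
  induction l with
  | nil => intro h; exact absurd rfl h
  | cons x xs ih =>
    intro _ hs
    cases xs with
    | nil => simp
    | cons y t =>
      rw [upRun_cons2] at hs
      by_cases hxy : x ≤ y
      · rw [if_pos hxy] at hs
        have := ih (by simp) hs
        simp only [List.head_cons] at this
        calc x ≤ y := hxy
          _ ≤ (y :: t).getLast (by simp) := this
          _ = (x :: y :: t).getLast (by simp) := (List.getLast_cons (by simp)).symm
      · rw [if_neg hxy] at hs; simp [short] at hs

lemma noninc_head_last : ∀ (l : List Int) (h : l ≠ []),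
    short (downRun l) = true → l.getLast h ≤ l.head h := by
  intro l
  induction l with
  | nil => intro h; exact absurd rfl h
  | cons x xs ih =>
    intro _ hs
    cases xs with
    | nil => simp
    | cons y t =>
      rw [downRun_cons2] at hs
      by_cases hxy : y ≤ x
      · rw [if_pos hxy] at hs
        have := ih (by simp) hs
        simp only [List.head_cons] at this
        calc (x :: y :: t).getLast (by simp) = (y :: t).getLast (by simp) :=
              List.getLast_cons (by simp)
          _ ≤ y := this
          _ ≤ x := hxy
      · rw [if_neg hxy] at hs; simp [short] at hs

lemma nondec_append : ∀ (l : List Int) (h : l ≠ []) (b : Int),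
    short (upRun (l ++ [b])) = (short (upRun l) && decide (l.getLast h ≤ b)) := by
  intro l
  induction l with
  | nil => intro h; exact absurd rfl h
  | cons x xs ih =>
    intro _ b
    cases xs with
    | nil =>
      simp only [List.cons_append, List.nil_append, upRun_cons2, List.getLast_singleton]
      by_cases hxb : x ≤ b
      · simp [hxb, short, upRun]
      · simp [hxb, short]
    | cons y t =>
      have hne : (y :: t) ≠ [] := by simp
      simp only [List.cons_append, upRun_cons2]
      by_cases hxy : x ≤ y
      · have ih' := ih hne b
        simp only [List.cons_append] at ih'
        rw [if_pos hxy, if_pos hxy, ih', List.getLast_cons hne]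
      · rw [if_neg hxy, if_neg hxy]
        simp [short]

lemma valley_append : ∀ (l : List Int) (h : l ≠ []) (b : Int),
    short (upRun (downRun (l ++ [b]))) =
      if l.getLast h ≤ b then short (upRun (downRun l)) else short (downRun (l ++ [b])) := by
  intro l
  induction l with
  | nil => intro h; exact absurd rfl h
  | cons x xs ih =>
    intro _ b
    cases xs with
    | nil =>
      simp only [List.cons_append, List.nil_append, downRun_cons2, List.getLast_singleton]
      by_cases hxb : x ≤ b
      · by_cases hbx : b ≤ x
        · simp [hxb, hbx, downRun, upRun, short]
        · simp [hxb, hbx, upRun_cons2, downRun, upRun, short]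
      · have hbx : b ≤ x := le_of_lt (lt_of_not_ge hxb)
        simp [hxb, hbx, downRun, upRun, short]
    | cons y t =>
      have hne : (y :: t) ≠ [] := by simp
      have hlast : (x :: y :: t).getLast (by simp) = (y :: t).getLast hne :=
        List.getLast_cons hne
      simp only [List.cons_append, downRun_cons2]
      by_cases hxy : y ≤ x
      · have ih' := ih hne b
        simp only [List.cons_append] at ih'
        rw [if_pos hxy, if_pos hxy, ih', hlast]
      · rw [if_neg hxy, if_neg hxy, hlast]
        have h1 : short (upRun ((x :: y :: t) ++ [b])) =
            (short (upRun (x :: y :: t)) && decide ((x :: y :: t).getLast (by simp) ≤ b)) :=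
          nondec_append (x :: y :: t) (by simp) b
        simp only [List.cons_append] at h1
        by_cases hlb : (y :: t).getLast hne ≤ b
        · rw [if_pos hlb, h1, hlast, decide_eq_true hlb, Bool.and_true]
        · rw [if_neg hlb, h1, hlast, decide_eq_false hlb]
          simp [short]

-- A's pop-left step seen on B's side
lemma valley_cons (x : Int) (xs : List Int) (hbx : (x :: xs).getLast (by simp) ≤ x) :
    short (upRun (downRun (x :: xs))) = (short (upRun (downRun xs)) && topOk xs (some x)) := by
  cases xs with
  | nil => rfl
  | cons h t2 =>
    have hne : (h :: t2) ≠ [] := by simp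
    have hlast : (x :: h :: t2).getLast (by simp) = (h :: t2).getLast hne :=
      List.getLast_cons hne
    rw [hlast] at hbx
    rw [downRun_cons2]
    by_cases hhx : h ≤ x
    · rw [if_pos hhx]
      have : topOk (h :: t2) (some x) = true := by
        simp only [topOk, decide_eq_true_eq]
        omega
      rw [this, Bool.and_true]
    · rw [if_neg hhx]
      have hxh : x ≤ h := le_of_lt (lt_of_not_ge hhx)
      rw [upRun_cons2, if_pos hxh]
      have hrhs : topOk (h :: t2) (some x) = false := by
        simp only [topOk, decide_eq_false_iff_not]
        omega
      rw [hrhs, Bool.and_false]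
      rcases Bool.eq_false_or_eq_true (short (upRun (h :: t2))) with ht | hf
      · exact absurd (nondec_head_last (h :: t2) hne ht) (by simp only [List.head_cons]; omega)
      · exact hf

lemma loop_eq : ∀ (n : Nat) (l : List Int), l.length = n → ∀ (t : Option Int),
    piling_up_loop l t = (short (upRun (downRun l)) && topOk l t) := by
  intro n
  induction n using Nat.strong_induction_on with
  | _ n ih =>
    intro l hn t
    cases l with
    | nil =>
      cases t <;> simp [piling_up_loop.eq_def, downRun, upRun, short, topOk]
    | cons x xs =>
      rw [piling_up_loop.eq_def]
      simp only []
      set b := (x :: xs).getLast (by simp) with hb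
      by_cases hg : (match t with | none => false | some t0 => decide (t0 < max x b)) = true
      · rw [if_pos hg]
        cases t with
        | none => simp at hg
        | some t0 =>
          simp only [decide_eq_true_eq] at hg
          have : topOk (x :: xs) (some t0) = false := by
            simp only [topOk, ← hb, decide_eq_false_iff_not]; omega
          rw [this, Bool.and_false]
      · rw [if_neg hg]
        have htop : topOk (x :: xs) t = true := by
          cases t with
          | none => rfl
          | some t0 =>
            simp only [decide_eq_true_eq, not_lt] at hg
            simp only [topOk, ← hb, decide_eq_true_eq]
            omega
        rw [htop, Bool.and_true]
        by_cases hx : x = max x b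
        · rw [if_pos hx]
          have hbx : b ≤ x := hx ▸ le_max_right x b
          have hrec := ih xs.length (by simp [← hn]) xs rfl (some x)
          rw [hrec, valley_cons x xs (hb ▸ hbx)]
        · rw [if_neg hx]
          have hxb : x < b := by
            rcases max_choice x b with hc | hc
            · exact absurd hc.symm hx
            · have h1 : x ≤ b := hc ▸ le_max_left x b
              rcases lt_or_eq_of_le h1 with h2 | h2
              · exact h2
              · exact absurd (by rw [hc, ← h2]) hx
          -- xs ≠ []: a singleton has b = x, contradicting x < b
          cases xs with
          | nil => simp only [hb, List.getLast_singleton] at hxb; omega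
          | cons y t2 =>
            have hd : (x :: y :: t2).dropLast = x :: (y :: t2).dropLast := rfl
            set L := (y :: t2).dropLast with hL
            have hspl : (x :: L) ++ [b] = x :: y :: t2 := by
              rw [hL, ← hd, hb]; exact List.dropLast_append_getLast (by simp)
            have hlen : (x :: L).length < n := by
              rw [← hn, hL]; simp
            have hrec := ih (x :: L).length hlen (x :: L) rfl (some b)
            rw [hd, hrec]
            have hva := valley_append (x :: L) (by simp) b
            rw [hspl] at hva
            rw [hva]
            set g := (x :: L).getLast (by simp) with hg2
            have htk : topOk (x :: L) (some b) = decide (max x g ≤ b) := rfl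
            by_cases hlb : g ≤ b
            · rw [if_pos hlb, htk]
              have : decide (max x g ≤ b) = true := by
                simp only [decide_eq_true_eq]; omega
              rw [this, Bool.and_true]
            · rw [if_neg hlb, htk]
              have : decide (max x g ≤ b) = false := by
                simp only [decide_eq_false_iff_not]; omega
              rw [this, Bool.and_false]
              rcases Bool.eq_false_or_eq_true (short (downRun (x :: y :: t2))) with ht | hf
              · have := noninc_head_last (x :: y :: t2) (by simp) ht
                simp only [List.head_cons] at this
                rw [← hb] at this
                omega
              · exact hf.symm

-- ===== VERDICT (by name: the statement is the Claim_ definition above) =====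
theorem piling_up_spec : Claim_equal_piling_up := by
  intro arr _
  unfold Spec_piling_up piling_up piling_up_alt
  rw [loop_eq arr.length arr rfl none]
  cases arr <;> simp [topOk]
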